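-- pv_equiv track=rewrite | github.com/ThomasCZhang/CMU-02604-Bioinformatics-Spring2023 | PeptideSequencing/CyclopeptideSequencing.py | CheckSpectrumCompatibility
-- ===== SOURCE A (Python) =====
-- def CheckSpectrumCompatibility(peptide_spectrum: list[int], spectrum: list[int]) -> bool:
--     """
--     CheckSpectrumCompatibility: Checks if the spectrum generated by peptide is compatible with a given spectrum.
--
--     Input:
--         peptide: The peptide as a string of single letter amino acids.
--
--         spectrum: The mass spectrum being used to determine whether peptide is compatible or not.
--
--     Output:
--         bool: True if peptide is compatible. False otherwise.
--     """
--
--     used_indicies = [] # indexes of masses in spectrum that have already been matched with a mass in peptide_spectrum.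
--     for pep_mass in peptide_spectrum:
--         found_match = False
--         for ind, spec_mass in enumerate(spectrum):
--             if (pep_mass == spec_mass) and (ind not in used_indicies):
--                 used_indicies.append(ind)
--                 found_match = True
--                 break
--         if not found_match: # If there is a unmatched mass between the theoretical spectrum and given spectrum.
--             return False
--
--     return True
-- ===== SOURCE B (Python) =====
-- def CheckSpectrumCompatibility(peptide_spectrum: list[int], spectrum: list[int]) -> bool:
--     """Count-based check: build a multiset count of spectrum once, then consume one
--     count per peptide mass; replaces A's quadratic scan with used-index bookkeeping."""
--     counts = {}
--     for mass in spectrum: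
--         counts[mass] = counts.get(mass, 0) + 1
--     for mass in peptide_spectrum:
--         c = counts.get(mass, 0)
--         if c == 0:
--             return False
--         counts[mass] = c - 1
--     return True
-- ===== Notes on version B (the rewrite author's own statement) =====
-- stated objective: faster
-- what changed: Replaces A's per-mass full scan of spectrum with used-index membership tests by a count dictionary built once over spectrum and decremented per peptide mass.
import Mathlib
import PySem

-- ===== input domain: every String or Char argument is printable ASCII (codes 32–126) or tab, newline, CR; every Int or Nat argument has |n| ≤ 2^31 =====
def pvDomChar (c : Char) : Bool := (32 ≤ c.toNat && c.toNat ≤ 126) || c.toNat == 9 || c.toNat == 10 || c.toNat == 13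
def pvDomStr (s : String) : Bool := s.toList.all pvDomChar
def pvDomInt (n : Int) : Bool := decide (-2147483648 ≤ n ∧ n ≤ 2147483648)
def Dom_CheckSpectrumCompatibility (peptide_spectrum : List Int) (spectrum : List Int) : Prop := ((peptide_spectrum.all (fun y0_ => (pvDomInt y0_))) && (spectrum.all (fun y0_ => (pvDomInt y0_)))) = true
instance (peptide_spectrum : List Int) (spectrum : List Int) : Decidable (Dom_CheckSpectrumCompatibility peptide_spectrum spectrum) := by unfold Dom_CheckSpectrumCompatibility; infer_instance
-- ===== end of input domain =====

-- B replaces A's per-mass scan of spectrum with used-index bookkeeping by a count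
-- dictionary built once over spectrum and decremented per peptide mass (objective: faster).

-- ===== PORT A =====
-- inner 'for ind, spec_mass in enumerate(spectrum): … break' loop: first matching pair
def aFind (pep_mass : Int) (pairs : List (Int × Int)) (used : List Int) : Option (Int × Int) :=
  pairs.find? (fun p => p.2 == pep_mass && !(used.contains p.1))

-- outer 'for pep_mass in peptide_spectrum' loop carrying the used_indicies accumulator
def aGo (spectrum : List Int) : List Int → List Int → Bool
  | [], _ => true
  | pep_mass :: rest, used =>
    match aFind pep_mass (PySem.List.enumerate spectrum 0) used with
    | some p => aGo spectrum rest (used ++ [p.1])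
    | none => false

def CheckSpectrumCompatibility (peptide_spectrum : List Int) (spectrum : List Int) : Bool :=
  aGo spectrum peptide_spectrum []

-- ===== PORT B =====
-- second loop of Source B: consume one count per peptide mass, early return False at zero
def bGo : List Int → PySem.Dict Int Int → Bool
  | [], _ => true
  | mass :: rest, counts =>
    let c := counts.getD mass 0
    if c == 0 then false else bGo rest (counts.insert mass (c - 1))

def CheckSpectrumCompatibility_alt (peptide_spectrum : List Int) (spectrum : List Int) : Bool :=
  bGo peptide_spectrum
    (spectrum.foldl (fun d mass => d.insert mass (d.getD mass 0 + 1)) PySem.Dict.empty)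

-- ===== PRECONDITION & SPEC =====
def Spec_CheckSpectrumCompatibility (peptide_spectrum : List Int) (spectrum : List Int) (out : Bool) : Prop := out = CheckSpectrumCompatibility_alt peptide_spectrum spectrum
instance (peptide_spectrum : List Int) (spectrum : List Int) (out : Bool) : Decidable (Spec_CheckSpectrumCompatibility peptide_spectrum spectrum out) := by unfold Spec_CheckSpectrumCompatibility; infer_instance

-- ===== CLAIM (what is proved, stated in full; the proofs are below) =====
def Claim_equal_CheckSpectrumCompatibility : Prop := ∀ (peptide_spectrum : List Int) (spectrum : List Int), Dom_CheckSpectrumCompatibility peptide_spectrum spectrum → Spec_CheckSpectrumCompatibility peptide_spectrum spectrum (CheckSpectrumCompatibility peptide_spectrum spectrum)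

-- ===== LEMMAS AND PROOFS =====

-- reference form both ports are reduced to: erase one occurrence per peptide mass
def eraseGo : List Int → List Int → Bool
  | [], _ => true
  | m :: rest, r => if m ∈ r then eraseGo rest (r.erase m) else false

-- A's successful inner search over (index, value) pairs with distinct indices removes
-- exactly the first remaining occurrence of m from the unmatched values
lemma find_some_filter (m : Int) (used : List Int) (es : List (Int × Int)) (q : Int × Int)
    (hnd : (es.map (·.1)).Nodup)
    (h : es.find? (fun p => p.2 == m && !(used.contains p.1)) = some q) :
    ((es.filter (fun p => !((used ++ [q.1]).contains p.1))).map (·.2))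
      = ((es.filter (fun p => !(used.contains p.1))).map (·.2)).erase m := by
  induction es with
  | nil => simp at h
  | cons p tl ih =>
    simp only [List.map_cons, List.nodup_cons, List.mem_map] at hnd
    obtain ⟨hp1, hndtl⟩ := hnd
    cases hpred : (p.2 == m && !(used.contains p.1)) with
    | true =>
      rw [List.find?_cons] at h
      rw [hpred] at h
      simp only [Option.some.injEq] at h
      cases h
      simp only [Bool.and_eq_true, beq_iff_eq, Bool.not_eq_true'] at hpred
      obtain ⟨hpm, hpc⟩ := hpred
      have hhead : ((used ++ [q.1]).contains q.1) = true := by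
        simp [List.contains_eq_mem]
      rw [List.filter_cons, List.filter_cons, hhead, hpc]
      simp only [Bool.not_true, Bool.not_false, Bool.false_eq_true, if_false, if_true,
        List.map_cons, hpm, List.erase_cons_head]
      congr 1
      apply List.filter_congr
      intro x hx
      have hxne : x.1 ≠ q.1 := fun hh => hp1 ⟨x, hx, hh⟩
      simp [List.contains_eq_mem, hxne]
    | false =>
      rw [List.find?_cons, hpred] at h
      have hqmem : q ∈ tl := List.mem_of_find?_eq_some h
      have hq1 : p.1 ≠ q.1 := fun hh => hp1 ⟨q, hqmem, hh.symm⟩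
      have hcont : ((used ++ [q.1]).contains p.1) = (used.contains p.1) := by
        simp [List.contains_eq_mem, hq1]
      rw [List.filter_cons, List.filter_cons, hcont]
      cases hcu : (used.contains p.1) with
      | true =>
        simp only [Bool.not_true]
        rw [if_neg (by simp), if_neg (by simp)]
        exact ih hndtl h
      | false =>
        have hpm : (p.2 == m) = false := by
          cases hbe : (p.2 == m)
          · rfl
          · exfalso
            rw [hbe, hcu] at hpred
            simp at hpred
        simp only [Bool.not_false, if_true, List.map_cons]
        rw [List.erase_cons_tail (by simp [hpm])]
        rw [ih hndtl h]

lemma enum_fst_nodup (s : List Int) : ((PySem.List.enumerate s 0).map (·.1)).Nodup := by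
  rw [PySem.List.map_fst_enumerate]
  exact PySem.List.nodup_pyRange_one 0 _

-- A's outer loop equals eraseGo on the values at unused indices
lemma aGo_eq (spectrum : List Int) :
    ∀ (ps used : List Int),
      aGo spectrum ps used
        = eraseGo ps (((PySem.List.enumerate spectrum 0).filter
            (fun p => !(used.contains p.1))).map (·.2)) := by
  intro ps
  induction ps with
  | nil => intro used; rfl
  | cons m rest ih =>
    intro used
    cases hfind : aFind m (PySem.List.enumerate spectrum 0) used with
    | none =>
      simp only [aGo, hfind, eraseGo]
      have hnm : m ∉ ((PySem.List.enumerate spectrum 0).filter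
          (fun p => !(used.contains p.1))).map (·.2) := by
        intro hmem
        obtain ⟨p, hpmem, hpv⟩ := List.mem_map.mp hmem
        obtain ⟨hpes, hpf⟩ := List.mem_filter.mp hpmem
        have := List.find?_eq_none.mp hfind p hpes
        simp [hpv, List.contains_eq_mem] at this hpf
        exact hpf this
      rw [if_neg hnm]
    | some q =>
      simp only [aGo, hfind, eraseGo]
      have hfind' : (PySem.List.enumerate spectrum 0).find?
          (fun p => p.2 == m && !(used.contains p.1)) = some q := hfind
      have hqmem : q ∈ PySem.List.enumerate spectrum 0 := List.mem_of_find?_eq_some hfind'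
      have hpred' := Bool.and_eq_true_iff.mp (List.find?_some (p := fun (p : Int × Int) => p.2 == m && !(used.contains p.1)) hfind')
      have hmmem : m ∈ ((PySem.List.enumerate spectrum 0).filter
          (fun p => !(used.contains p.1))).map (·.2) := by
        apply List.mem_map.mpr
        exact ⟨q, List.mem_filter.mpr ⟨hqmem, hpred'.2⟩, beq_iff_eq.mp hpred'.1⟩
      rw [if_pos hmmem, ih (used ++ [q.1]),
        find_some_filter m used _ q (enum_fst_nodup spectrum) hfind']

-- B's consuming loop equals eraseGo whenever the dict holds the counts of r
lemma bGo_eq : ∀ (ps : List Int) (d : PySem.Dict Int Int) (r : List Int),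
    (∀ x, d.getD x 0 = (r.count x : Int)) → bGo ps d = eraseGo ps r := by
  intro ps
  induction ps with
  | nil => intro d r h; rfl
  | cons m rest ih =>
    intro d r h
    simp only [bGo, eraseGo]
    have hc := h m
    by_cases hm : m ∈ r
    · have hpos : 0 < r.count m := List.count_pos_iff.mpr hm
      have hne : (d.getD m 0 == 0) = false := by
        simp [hc]; omega
      rw [hne, if_pos hm]
      simp only [Bool.false_eq_true, if_false]
      apply ih
      intro x
      rw [PySem.Dict.getD_insert]
      by_cases hx : x = m
      · subst hx
        rw [if_pos rfl, hc, List.count_erase_self]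
        omega
      · rw [if_neg hx, h x, List.count_erase_of_ne hx]
    · have hz : r.count m = 0 := List.count_eq_zero.mpr hm
      have he : (d.getD m 0 == 0) = true := by simp [hc, hz]
      rw [he, if_neg hm]
      simp

-- ===== VERDICT (by name: the statement is the Claim_ definition above) =====
theorem CheckSpectrumCompatibility_spec : Claim_equal_CheckSpectrumCompatibility := by
  intro ps s _
  unfold Spec_CheckSpectrumCompatibility CheckSpectrumCompatibility CheckSpectrumCompatibility_alt
  rw [aGo_eq, bGo_eq ps _ s]
  · simp [PySem.List.map_snd_enumerate]
  · intro x
    rw [PySem.Dict.getD_foldl_insert_add_one]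
    simp [PySem.Dict.getD_empty]
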